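-- pv_equiv track=rewrite | github.com/jradcliffe5/EVNPC_chair | reviews_to_latex.py | parse_value_block
-- ===== SOURCE A (Python) =====
-- from typing import Dict, Iterable, List, Optional, Sequence
--
-- FIELD_NAMES = [
--     "Grade",
--     "Referee comments",
--     "Technical review",
--     "Time recommended",
-- ]
--
-- def parse_value_block(
--     lines: List[str],
--     start_index: int,
--     field_names: Sequence[str] = FIELD_NAMES,
-- ) -> tuple[str, str, int]:
--     """Return (label, value, next_index) for the block starting at start_index."""
--     raw_line = lines[start_index]
--     label, value = raw_line.split(":", 1)
--     label = label.strip()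
--     paragraphs: List[str] = []
--     current: List[str] = []
--     first_value = value.strip()
--     if first_value:
--         current.append(first_value)
--     index = start_index + 1
--     while index < len(lines):
--         candidate = lines[index]
--         stripped = candidate.strip()
--         if any(stripped.startswith(f"{name}:") for name in field_names):
--             break
--         if stripped == "":
--             if current:
--                 paragraphs.append(" ".join(current).strip())
--                 current = []
--             index += 1
--             continue
--         current.append(stripped)
--         index += 1
--     if current:
--         paragraphs.append(" ".join(current).strip())
--     cleaned_value = "\n\n".join(paragraphs).strip()
--     return label, cleaned_value, index
-- ===== SOURCE B (Python) =====
-- from typing import Dict, Iterable, List, Optional, Sequence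
--
-- FIELD_NAMES = [
--     "Grade",
--     "Referee comments",
--     "Technical review",
--     "Time recommended",
-- ]
--
-- def _is_field(stripped, field_names):
--     return any(stripped.startswith(name + ":") for name in field_names)
--
-- def parse_value_block(
--     lines: List[str],
--     start_index: int,
--     field_names: Sequence[str] = FIELD_NAMES,
-- ) -> tuple[str, str, int]:
--     """Return (label, value, next_index) for the block starting at start_index."""
--     label, value = lines[start_index].split(":", 1)
--     # Phase 1: locate next_index, collecting the stripped in-between lines.
--     index = start_index + 1
--     body = []
--     while index < len(lines):
--         stripped = lines[index].strip()
--         if _is_field(stripped, field_names):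
--             break
--         body.append(stripped)
--         index += 1
--     first = value.strip()
--     if first:
--         body = [first] + body
--     # Phase 2: partition body into maximal runs of non-empty lines (two pointers).
--     paragraphs = []
--     i = 0
--     n = len(body)
--     while i < n:
--         if body[i] == "":
--             i += 1
--         else:
--             j = i
--             run = []
--             while j < n and body[j] != "":
--                 run.append(body[j])
--                 j += 1
--             paragraphs.append(" ".join(run).strip())
--             i = j
--     return label.strip(), "\n\n".join(paragraphs).strip(), index
-- ===== Notes on version B (the rewrite author's own statement) =====
-- stated objective: alternative
-- what changed: A builds paragraphs inside the scan with an accumulate-and-flush current buffer; B first only locates next_index while collecting the stripped body lines, then partitions the body into maximal non-empty runs with a two-pointer pass and joins them.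
import Mathlib
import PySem

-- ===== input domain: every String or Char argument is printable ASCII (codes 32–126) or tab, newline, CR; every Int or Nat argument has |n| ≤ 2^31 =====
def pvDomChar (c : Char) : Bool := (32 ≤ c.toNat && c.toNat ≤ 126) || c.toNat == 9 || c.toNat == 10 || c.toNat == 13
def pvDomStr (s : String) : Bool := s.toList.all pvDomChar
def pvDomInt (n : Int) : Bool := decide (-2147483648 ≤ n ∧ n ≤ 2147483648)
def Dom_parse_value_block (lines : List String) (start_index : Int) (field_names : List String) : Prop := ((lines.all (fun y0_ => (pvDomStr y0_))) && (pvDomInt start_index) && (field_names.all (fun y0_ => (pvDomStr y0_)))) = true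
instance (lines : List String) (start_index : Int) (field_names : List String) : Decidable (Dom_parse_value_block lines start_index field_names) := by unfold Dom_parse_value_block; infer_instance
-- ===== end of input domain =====

-- B re-decomposes A's single accumulate-and-flush scan into: locate next_index while collecting
-- stripped body lines, then a two-pointer partition of the body into non-empty runs (alternative
-- decomposition, same cost). Equivalence of return values is proved on Pre_ (where A returns).

-- ===== PORT A =====
-- the while-loop of A: state (paragraphs, current, index); fuel makes the loop structural
def pvA_loop (lines field_names : List String) : Nat → Int → List String → List String → List String × List String × Int
  | 0, index, paragraphs, current => (paragraphs, current, index)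
  | fuel + 1, index, paragraphs, current =>
    if index < (lines.length : Int) then
      let stripped := PySem.Str.strip (PySem.List.pyGetD lines index "")
      if field_names.any (fun name => PySem.Str.startswith stripped (name ++ ":")) then
        (paragraphs, current, index)
      else if stripped = "" then
        if current ≠ [] then
          pvA_loop lines field_names fuel (index + 1)
            (paragraphs ++ [PySem.Str.strip (PySem.Str.join " " current)]) []
        else
          pvA_loop lines field_names fuel (index + 1) paragraphs current
      else
        pvA_loop lines field_names fuel (index + 1) paragraphs (current ++ [stripped])
    else (paragraphs, current, index)

-- the body of A once label/value are unpacked from lines[start_index]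
def pvA_main (lines field_names : List String) (start_index : Int) (label value : String) : String × String × Int :=
  let first_value := PySem.Str.strip value
  let current : List String := if first_value ≠ "" then [first_value] else []
  let r := pvA_loop lines field_names ((lines.length : Int) - (start_index + 1)).toNat (start_index + 1) [] current
  let paragraphs := if r.2.1 ≠ [] then r.1 ++ [PySem.Str.strip (PySem.Str.join " " r.2.1)] else r.1
  (PySem.Str.strip label, PySem.Str.strip (PySem.Str.join "\n\n" paragraphs), r.2.2)

def parse_value_block (lines : List String) (start_index : Int) (field_names : List String) : String × String × Int :=
  match PySem.List.pyGet? lines start_index with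
  | none => ("", "", 0)          -- IndexError in Python; outside Pre_
  | some raw_line =>
    match PySem.Str.splitMax? raw_line ":" 1 with
    | some [label, value] => pvA_main lines field_names start_index label value
    | _ => ("", "", 0)           -- ValueError (no ":" in the line); outside Pre_

-- ===== PORT B =====
-- phase 1: scan for next_index, collecting stripped body lines (fuel makes the loop structural)
def pvB_scan (lines field_names : List String) : Nat → Int → List String → List String × Int
  | 0, index, body => (body, index)
  | fuel + 1, index, body =>
    if index < (lines.length : Int) then
      let stripped := PySem.Str.strip (PySem.List.pyGetD lines index "")
      if field_names.any (fun name => PySem.Str.startswith stripped (name ++ ":")) then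
        (body, index)
      else
        pvB_scan lines field_names fuel (index + 1) (body ++ [stripped])
    else (body, index)

-- phase 2 inner while: collect the run starting at j, return (run, end position)
def pvRun (body : List String) : Nat → Int → List String × Int
  | 0, j => ([], j)
  | fuel + 1, j =>
    if j < (body.length : Int) then
      if PySem.List.pyGetD body j "" ≠ "" then
        let p := pvRun body fuel (j + 1)
        (PySem.List.pyGetD body j "" :: p.1, p.2)
      else ([], j)
    else ([], j)

-- phase 2 outer while: two-pointer partition into paragraphs
def pvParas (body : List String) : Nat → Int → List String → List String
  | 0, _, acc => acc
  | fuel + 1, i, acc =>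
    if i < (body.length : Int) then
      if PySem.List.pyGetD body i "" = "" then
        pvParas body fuel (i + 1) acc
      else
        let p := pvRun body (fuel + 1) i
        pvParas body fuel p.2 (acc ++ [PySem.Str.strip (PySem.Str.join " " p.1)])
    else acc

-- the body of B once label/value are unpacked from lines[start_index]
def pvB_main (lines field_names : List String) (start_index : Int) (label value : String) : String × String × Int :=
  let r := pvB_scan lines field_names ((lines.length : Int) - (start_index + 1)).toNat (start_index + 1) []
  let first := PySem.Str.strip value
  let body := if first ≠ "" then first :: r.1 else r.1
  let paragraphs := pvParas body body.length 0 []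
  (PySem.Str.strip label, PySem.Str.strip (PySem.Str.join "\n\n" paragraphs), r.2)

def parse_value_block_alt (lines : List String) (start_index : Int) (field_names : List String) : String × String × Int :=
  (PySem.List.pyGet? lines start_index).elim ("", "", 0) (fun raw_line =>  -- none = IndexError in Python; outside Pre_
    match PySem.Str.splitMax? raw_line ":" 1 with
    | none => ("", "", 0)
    | some [] => ("", "", 0)
    | some (label :: rest) =>
      match rest with
      | [] => ("", "", 0)           -- ValueError (no ":" in the line); outside Pre_
      | value :: rest2 =>
        match rest2 with
        | [] => pvB_main lines field_names start_index label value
        | _ :: _ => ("", "", 0))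

-- ===== PRECONDITION & SPEC =====
-- Pre_ excludes exactly the inputs where the Python A raises: start_index out of range
-- (IndexError) or no ":" in lines[start_index] (ValueError from the 2-way unpack).
def Pre_parse_value_block (lines : List String) (start_index : Int) (field_names : List String) : Prop :=
  PySem.Raise.InRange lines.length start_index ∧
  PySem.Str.isIn ":" (PySem.List.pyGetD lines start_index "") = true
instance (lines : List String) (start_index : Int) (field_names : List String) : Decidable (Pre_parse_value_block lines start_index field_names) := by unfold Pre_parse_value_block; infer_instance

def pvWitness_parse_value_block : List String × Int × List String :=
  (["Grade: 4", "good", "", "fine", "Referee comments: ok"], 0, ["Grade", "Referee comments"])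

def Spec_parse_value_block (lines : List String) (start_index : Int) (field_names : List String) (out : String × String × Int) : Prop := out = parse_value_block_alt lines start_index field_names
instance (lines : List String) (start_index : Int) (field_names : List String) (out : String × String × Int) : Decidable (Spec_parse_value_block lines start_index field_names out) := by unfold Spec_parse_value_block; infer_instance

-- ===== CLAIM (what is proved, stated in full; the proofs are below) =====
def Claim_equal_parse_value_block : Prop := ∀ (lines : List String) (start_index : Int) (field_names : List String), Dom_parse_value_block lines start_index field_names → Pre_parse_value_block lines start_index field_names → Spec_parse_value_block lines start_index field_names (parse_value_block lines start_index field_names)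

-- ===== LEMMAS AND PROOFS =====

-- " ".join(current).strip()
def pvMk (cur : List String) : String := PySem.Str.strip (PySem.Str.join " " cur)

-- A's flush semantics, abstracted over the collected body list
def pvProcA : List String → List String → List String
  | cur, [] => if cur ≠ [] then [pvMk cur] else []
  | cur, s :: rest =>
    if s = "" then
      (if cur ≠ [] then pvMk cur :: pvProcA [] rest else pvProcA [] rest)
    else pvProcA (cur ++ [s]) rest

-- the runs of non-empty strings, list form
def pvRuns : List String → List String
  | [] => []
  | s :: rest =>
    if s = "" then pvRuns rest
    else pvMk (s :: rest.takeWhile (· ≠ "")) :: pvRuns (rest.dropWhile (· ≠ ""))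
termination_by l => l.length
decreasing_by
  · simp
  · have := List.length_dropWhile_le (p := fun x => decide (x ≠ "")) (l := rest)
    simp at this ⊢; omega

theorem pvProcA_spec (body : List String) :
    (∀ cur, cur ≠ [] →
      pvProcA cur body =
        pvMk (cur ++ body.takeWhile (· ≠ "")) :: pvRuns (body.dropWhile (· ≠ ""))) ∧
    pvProcA [] body = pvRuns body := by
  induction body with
  | nil =>
    refine ⟨?_, ?_⟩
    · intro cur hc
      simp [pvProcA, hc, pvRuns]
    · simp [pvProcA, pvRuns]
  | cons s rest ih =>
    refine ⟨?_, ?_⟩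
    · intro cur hc
      by_cases hs : s = ""
      · subst hs
        simp only [pvProcA, if_pos rfl, if_pos hc, ih.2, ne_eq, hc, not_false_eq_true, ite_true]
        simp [pvRuns]
      · simp only [pvProcA, if_neg hs]
        rw [ih.1 (cur ++ [s]) (by simp)]
        simp [hs, List.takeWhile_cons, List.dropWhile_cons, List.append_assoc]
    · by_cases hs : s = ""
      · subst hs
        simp only [pvProcA, if_pos rfl, ih.2]
        simp [pvRuns]
      · simp only [pvProcA, if_neg hs, List.nil_append]
        rw [ih.1 [s] (by simp)]
        rw [pvRuns]
        simp [hs]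

theorem pvB_scan_acc (fuel : Nat) (lines field_names : List String) (index : Int)
    (b : List String) :
    pvB_scan lines field_names fuel index b =
      (b ++ (pvB_scan lines field_names fuel index []).1, (pvB_scan lines field_names fuel index []).2) := by
  induction fuel generalizing index b with
  | zero => simp [pvB_scan]
  | succ k ih =>
    rw [pvB_scan, pvB_scan]
    by_cases h : index < (lines.length : Int)
    · rw [if_pos h, if_pos h]
      simp only []
      split
      · simp
      · rw [ih (index + 1) (b ++ [PySem.Str.strip (PySem.List.pyGetD lines index "")]),
          ih (index + 1) ([] ++ [PySem.Str.strip (PySem.List.pyGetD lines index "")])]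
        simp
    · rw [if_neg h, if_neg h]
      simp
 
theorem pv_main (fuel : Nat) (lines field_names : List String) (index : Int)
    (P cur : List String) :
    ((if (pvA_loop lines field_names fuel index P cur).2.1 ≠ [] then
        (pvA_loop lines field_names fuel index P cur).1 ++ [pvMk (pvA_loop lines field_names fuel index P cur).2.1]
      else (pvA_loop lines field_names fuel index P cur).1),
     (pvA_loop lines field_names fuel index P cur).2.2)
    = (P ++ pvProcA cur (pvB_scan lines field_names fuel index []).1,
       (pvB_scan lines field_names fuel index []).2) := by
  induction fuel generalizing index P cur with
  | zero =>
    rw [pvA_loop, pvB_scan]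
    by_cases hc : cur = [] <;> simp [hc, pvProcA, pvMk]
  | succ k ih =>
    rw [pvA_loop, pvB_scan]
    by_cases h : index < (lines.length : Int)
    · rw [if_pos h, if_pos h]
      simp only []
      by_cases hf : (field_names.any fun name =>
          PySem.Str.startswith (PySem.Str.strip (PySem.List.pyGetD lines index "")) (name ++ ":")) = true
      · rw [if_pos hf, if_pos hf]
        by_cases hc : cur = [] <;> simp [hc, pvProcA, pvMk]
      · rw [if_neg hf, if_neg hf]
        rw [pvB_scan_acc k lines field_names (index + 1)
          ([] ++ [PySem.Str.strip (PySem.List.pyGetD lines index "")])]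
        simp only [List.nil_append]
        by_cases hs : PySem.Str.strip (PySem.List.pyGetD lines index "") = ""
        · rw [if_pos hs]
          by_cases hc : cur = []
          · subst hc
            rw [if_neg (show ¬(([] : List String) ≠ []) by simp)]
            rw [ih (index + 1) P []]
            rw [hs]
            simp [pvProcA]
          · rw [if_pos hc]
            rw [ih (index + 1) (P ++ [PySem.Str.strip (PySem.Str.join " " cur)]) []]
            rw [hs]
            simp [pvProcA, hc, pvMk, List.append_assoc]
        · rw [if_neg hs]
          rw [ih (index + 1) P (cur ++ [PySem.Str.strip (PySem.List.pyGetD lines index "")])]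
          simp [pvProcA, hs]
    · rw [if_neg h, if_neg h]
      by_cases hc : cur = [] <;> simp [hc, pvProcA, pvMk]

theorem pvRun_spec (fuel : Nat) (body : List String) (k : Nat)
    (hn : body.length - k ≤ fuel) :
    pvRun body fuel (k : Int) =
      ((body.drop k).takeWhile (· ≠ ""),
       (k : Int) + ((body.drop k).takeWhile (· ≠ "")).length) := by
  induction fuel generalizing k with
  | zero =>
    rw [pvRun]
    rw [List.drop_eq_nil_of_le (by omega)]
    simp
  | succ m ih =>
    rw [pvRun]
    by_cases hk : k < body.length
    · rw [if_pos (by push_cast; omega)]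
      have hget : PySem.List.pyGetD body (k : Int) "" = body[k] := by
        simp [PySem.List.pyGetD_natCast, List.getD_eq_getElem?_getD, List.getElem?_eq_getElem hk]
      have hdrop : body.drop k = body[k] :: body.drop (k + 1) :=
        List.drop_eq_getElem_cons hk
      by_cases hb : body[k] = ""
      · rw [if_neg (by simp [hget, hb])]
        rw [hdrop, List.takeWhile_cons]
        simp [hb]
      · rw [if_pos (by simp [hget, hb])]
        simp only []
        have hcast : ((k : Int) + 1) = ((k + 1 : Nat) : Int) := by push_cast; ring
        rw [hget, hcast, ih (k + 1) (by omega)]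
        rw [hdrop, List.takeWhile_cons]
        simp only [hb, decide_not, decide_false, Bool.not_false, if_pos]
        simp only [Prod.mk.injEq, List.length_cons]
        refine ⟨by simp [hb], by push_cast; ring⟩
    · rw [if_neg (by push_cast; omega)]
      rw [List.drop_eq_nil_of_le (by omega)]
      simp

theorem pvParas_spec (fuel : Nat) (body : List String) (k : Nat) (acc : List String)
    (hn : body.length - k ≤ fuel) :
    pvParas body fuel (k : Int) acc = acc ++ pvRuns (body.drop k) := by
  induction fuel generalizing k acc with
  | zero =>
    rw [pvParas]
    rw [List.drop_eq_nil_of_le (by omega)]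
    simp [pvRuns]
  | succ m ih =>
    rw [pvParas]
    by_cases hk : k < body.length
    · rw [if_pos (by push_cast; omega)]
      have hget : PySem.List.pyGetD body (k : Int) "" = body[k] := by
        simp [PySem.List.pyGetD_natCast, List.getD_eq_getElem?_getD, List.getElem?_eq_getElem hk]
      have hdrop : body.drop k = body[k] :: body.drop (k + 1) :=
        List.drop_eq_getElem_cons hk
      by_cases hb : body[k] = ""
      · rw [if_pos (by simp [hget, hb])]
        have hcast : ((k : Int) + 1) = ((k + 1 : Nat) : Int) := by push_cast; ring
        rw [hcast, ih (k + 1) acc (by omega)]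
        rw [hdrop, hb]
        rw [pvRuns]
        simp
      · rw [if_neg (by simp [hget, hb])]
        simp only []
        rw [pvRun_spec (m + 1) body k (by omega)]
        simp only []
        have htwlen : ((body.drop k).takeWhile (· ≠ "")).length ≤ body.length - k := by
          have h1 := congrArg List.length
            (List.takeWhile_append_dropWhile (p := fun x => decide (x ≠ "")) (l := body.drop k))
          simp only [List.length_append, List.length_drop] at h1
          omega
        have htwpos : 1 ≤ ((body.drop k).takeWhile (· ≠ "")).length := by
          rw [hdrop, List.takeWhile_cons]
          simp [hb]
        have hcast : ((k : Int) + (((body.drop k).takeWhile (· ≠ "")).length : Int))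
            = (((k + ((body.drop k).takeWhile (· ≠ "")).length : Nat)) : Int) := by push_cast; ring
        rw [hcast, ih (k + ((body.drop k).takeWhile (· ≠ "")).length) _ (by omega)]
        have hdw : body.drop (k + ((body.drop k).takeWhile (· ≠ "")).length)
            = (body.drop k).dropWhile (· ≠ "") := by
          have h2 : body.drop (k + ((body.drop k).takeWhile (· ≠ "")).length)
              = (body.drop k).drop ((body.drop k).takeWhile (· ≠ "")).length := by
            rw [List.drop_drop]
          rw [h2]
          have h3 := List.drop_left (l₁ := (body.drop k).takeWhile (· ≠ ""))
            (l₂ := (body.drop k).dropWhile (· ≠ ""))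
          rw [List.takeWhile_append_dropWhile] at h3
          rw [← h3, List.drop_drop]
        rw [hdw]
        have hruns : pvRuns (body.drop k) =
            pvMk ((body.drop k).takeWhile (· ≠ "")) :: pvRuns ((body.drop k).dropWhile (· ≠ "")) := by
          conv_lhs => rw [hdrop]
          rw [pvRuns, if_neg hb]
          rw [hdrop, List.takeWhile_cons, List.dropWhile_cons]
          simp [hb]
        rw [hruns]
        simp [pvMk, List.append_assoc]
    · rw [if_neg (by push_cast; omega)]
      rw [List.drop_eq_nil_of_le (by omega)]
      simp [pvRuns]

-- corollaries packaging the inductions at their call sites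
theorem pvParas_runs (body : List String) : pvParas body body.length 0 [] = pvRuns body := by
  have h := pvParas_spec body.length body 0 [] (by omega)
  simpa using h

theorem pvA_eq_scan (lines field_names : List String) (index : Int) (cur : List String) :
    ((if (pvA_loop lines field_names ((lines.length : Int) - index).toNat index [] cur).2.1 ≠ [] then
        (pvA_loop lines field_names ((lines.length : Int) - index).toNat index [] cur).1
          ++ [pvMk (pvA_loop lines field_names ((lines.length : Int) - index).toNat index [] cur).2.1]
      else (pvA_loop lines field_names ((lines.length : Int) - index).toNat index [] cur).1),
     (pvA_loop lines field_names ((lines.length : Int) - index).toNat index [] cur).2.2)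
    = (pvProcA cur (pvB_scan lines field_names ((lines.length : Int) - index).toNat index []).1,
       (pvB_scan lines field_names ((lines.length : Int) - index).toNat index []).2) := by
  have h := pv_main (((lines.length : Int) - index).toNat) lines field_names index [] cur
  simpa using h

theorem pvProcA_body (first : String) (scanned : List String) :
    pvProcA (if first ≠ "" then [first] else []) scanned
      = pvRuns (if first ≠ "" then first :: scanned else scanned) := by
  by_cases hf : first = ""
  · simp only [hf, ne_eq, not_true_eq_false, ite_false]
    exact (pvProcA_spec scanned).2
  · simp only [ne_eq, hf, not_false_eq_true, ite_true]
    rw [(pvProcA_spec scanned).1 [first] (by simp)]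
    rw [pvRuns, if_neg hf]
    rfl

theorem pvMain_eq (lines field_names : List String) (start_index : Int) (label value : String) :
    pvA_main lines field_names start_index label value
      = pvB_main lines field_names start_index label value := by
  unfold pvA_main pvB_main
  simp only [Prod.mk.injEq]
  refine ⟨trivial, ?_, ?_⟩
  · have hA := congrArg Prod.fst
      (pvA_eq_scan lines field_names (start_index + 1)
        (if PySem.Str.strip value ≠ "" then [PySem.Str.strip value] else []))
    simp only [pvMk] at hA
    rw [hA, pvProcA_body, ← pvParas_runs]
  · have hI := congrArg (fun p => p.2)
      (pvA_eq_scan lines field_names (start_index + 1)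
        (if PySem.Str.strip value ≠ "" then [PySem.Str.strip value] else []))
    simpa using hI

-- ===== VERDICT (by name: the statement is the Claim_ definition above) =====
theorem parse_value_block_spec : Claim_equal_parse_value_block := by
  intro lines start_index field_names _hdom _hpre
  unfold Spec_parse_value_block parse_value_block parse_value_block_alt
  generalize PySem.List.pyGet? lines start_index = og
  cases og with
  | none => rfl
  | some raw_line =>
    show (match PySem.Str.splitMax? raw_line ":" 1 with
      | some [label, value] => pvA_main lines field_names start_index label value
      | _ => ("", "", 0))
      = (match PySem.Str.splitMax? raw_line ":" 1 with
      | none => ("", "", 0)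
      | some [] => ("", "", 0)
      | some (label :: rest) =>
        match rest with
        | [] => ("", "", 0)
        | value :: rest2 =>
          match rest2 with
          | [] => pvB_main lines field_names start_index label value
          | _ :: _ => ("", "", 0))
    generalize PySem.Str.splitMax? raw_line ":" 1 = sp
    cases sp with
    | none => rfl
    | some parts =>
      match parts with
      | [] => rfl
      | [_] => rfl
      | _ :: _ :: _ :: _ => rfl
      | [label, value] => exact pvMain_eq lines field_names start_index label value
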